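-- pv_equiv track=rewrite | github.com/AndruKP/school_IT | zoi2021/2/A.py | make_values
-- ===== SOURCE A (Python) =====
-- def make_values(cards):
--     values = dict()
--     for card in cards:
--         value = card[:-1]
--         if value in values:
--             values[value].append(card)
--         else:
--             values[value] = [card]
--     return values
-- ===== SOURCE B (Python) =====
-- def make_values(cards):
--     # two-pass: distinct prefixes in first-occurrence order, then one filter per key
--     keys = list(dict.fromkeys(card[:-1] for card in cards))
--     return {key: [card for card in cards if card[:-1] == key] for key in keys}
-- ===== Notes on version B (the rewrite author's own statement) =====
-- stated objective: alternative
-- what changed: Replaces A's single-pass dict mutation (contains check, append-or-create) with a two-pass functional form: first dedup the list of prefixes keeping first occurrences, then build the result by one filter comprehension per distinct prefix.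
import Mathlib
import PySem

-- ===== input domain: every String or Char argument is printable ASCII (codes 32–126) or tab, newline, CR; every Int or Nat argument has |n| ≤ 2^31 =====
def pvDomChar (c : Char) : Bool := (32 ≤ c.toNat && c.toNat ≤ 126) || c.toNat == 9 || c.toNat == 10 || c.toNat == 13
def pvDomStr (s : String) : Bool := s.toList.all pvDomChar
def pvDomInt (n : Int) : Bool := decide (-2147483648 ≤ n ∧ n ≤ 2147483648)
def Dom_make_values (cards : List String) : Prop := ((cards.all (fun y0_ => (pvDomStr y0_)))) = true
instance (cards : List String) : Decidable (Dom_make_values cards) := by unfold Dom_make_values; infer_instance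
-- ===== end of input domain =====

-- B replaces A's single-pass dict mutation with a two-pass form (ordered dedup of
-- prefixes, then one filter per distinct prefix); alternative decomposition, same results.


-- ===== PORT A =====
def make_values (cards : List String) : List (String × List String) :=
  (cards.foldl (fun values card =>
      let value := PySem.Str.slice card none (some (-1))
      if values.contains value then
        values.modify value [] (fun l => l ++ [card])
      else
        values.insert value [card])
    PySem.Dict.empty).items

-- ===== PORT B =====
def make_values_alt (cards : List String) : List (String × List String) :=
  let keys := PySem.List.dedup (cards.map (fun card => PySem.Str.slice card none (some (-1))))
  keys.map (fun key =>
    (key, cards.filter (fun card => PySem.Str.slice card none (some (-1)) == key)))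

-- ===== PRECONDITION & SPEC =====
def Spec_make_values (cards : List String) (out : List (String × List String)) : Prop := out = make_values_alt cards
instance (cards : List String) (out : List (String × List String)) : Decidable (Spec_make_values cards out) := by unfold Spec_make_values; infer_instance

-- ===== CLAIM (what is proved, stated in full; the proofs are below) =====
def Claim_equal_make_values : Prop := ∀ (cards : List String), Dom_make_values cards → Spec_make_values cards (make_values cards)

-- ===== LEMMAS AND PROOFS =====

-- A's loop body (contains? append : create) is exactly Dict.modify with default []
theorem mv_step_eq (d : PySem.Dict String (List String)) (card : String) :
    (let value := PySem.Str.slice card none (some (-1))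
     if d.contains value then d.modify value [] (fun l => l ++ [card])
     else d.insert value [card]) =
    d.modify (PySem.Str.slice card none (some (-1))) [] (fun l => l ++ [card]) := by
  simp only []
  split_ifs with h
  · rfl
  · simp only [PySem.Dict.modify, PySem.Dict.getD_of_not_contains _ _ (by simpa using h)]
    rfl

theorem mv_fold_eq (cards : List String) :
    cards.foldl (fun values card =>
      let value := PySem.Str.slice card none (some (-1))
      if values.contains value then values.modify value [] (fun l => l ++ [card])
      else values.insert value [card]) PySem.Dict.empty =
    (cards.map (fun card => (PySem.Str.slice card none (some (-1)), card))).foldl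
      (fun d p => d.modify p.1 [] (fun l => l ++ [p.2])) PySem.Dict.empty := by
  rw [List.foldl_map]
  congr 1
  funext d c
  exact mv_step_eq d c

-- the grouping fold, viewed through (key, card) pairs
theorem mv_items (cards : List String) :
    ((cards.map (fun card => (PySem.Str.slice card none (some (-1)), card))).foldl
      (fun d p => d.modify p.1 [] (fun l => l ++ [p.2])) PySem.Dict.empty).items =
    make_values_alt cards := by
  set pairs := cards.map (fun card => (PySem.Str.slice card none (some (-1)), card)) with hpairs
  have hnd : ((pairs.foldl (fun d p => d.modify p.1 [] (fun l => l ++ [p.2]))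
      PySem.Dict.empty)).keys.Nodup := by
    exact PySem.Dict.nodup_keys_foldl_modify_key pairs (·.1) [] (fun _ p l => l ++ [p.2]) _
      (by simp [PySem.Dict.empty, PySem.Dict.keys])
  rw [PySem.Dict.items_eq_map_keys _ hnd []]
  have hkeys : ((pairs.foldl (fun d p => d.modify p.1 [] (fun l => l ++ [p.2]))
      PySem.Dict.empty)).keys =
      PySem.List.dedup (cards.map (fun card => PySem.Str.slice card none (some (-1)))) := by
    rw [PySem.Dict.keys_foldl_modify_key pairs (·.1) [] (fun _ p l => l ++ [p.2])]
    have : (PySem.Dict.empty : PySem.Dict String (List String)).keys = [] := by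
      simp [PySem.Dict.empty, PySem.Dict.keys]
    rw [this]
    show PySem.Set.update PySem.Set.empty (pairs.map (·.1)) = _
    rw [PySem.Set.update_empty]
    simp [hpairs, List.map_map, Function.comp_def]
  rw [hkeys]
  unfold make_values_alt
  simp only []
  apply List.map_congr_left
  intro k _
  congr 1
  rw [PySem.Dict.getD_foldl_modify_append pairs PySem.Dict.empty k]
  rw [hpairs, List.filter_map]
  simp [Function.comp_def]

-- ===== VERDICT (by name: the statement is the Claim_ definition above) =====
theorem make_values_spec : Claim_equal_make_values := by
  intro cards _
  unfold Spec_make_values make_values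
  rw [mv_fold_eq, mv_items]
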